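-- pv_equiv track=rewrite | github.com/AakashNakarmi/qd-cc-agent-pipeline | utils/boq_utils.py | merge_boq_descriptions_advanced
-- ===== SOURCE A (Python) =====
-- def merge_boq_descriptions_advanced(processed_records):
--     """
--     Advanced version that handles continuous merging for multiple valid records
--     after a group of invalid ones.
--
--     Args:
--         processed_records (list): List of dictionaries containing BOQ records
--
--     Returns:
--         list: Processed records with merged descriptions
--     """
--     if not processed_records:
--         return processed_records
--
--     def is_valid_item_number(item_number):
--         """Check if ItemNumber starts with an alphabet (a-z or A-Z)"""
--         if not item_number or item_number == '' or str(item_number).strip() == '':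
--             return False
--         return str(item_number)[0].isalpha()
--
--     def clean_description(description):
--         """Clean and normalize description text"""
--         if not description:
--             return ""
--         return str(description).strip()
--
--     result = []
--     accumulated_description = ""
--
--     i = 0
--     while i < len(processed_records):
--         record = processed_records[i]
--         item_number = record.get('ItemNumber', '')
--         description = clean_description(record.get('Description', ''))
--
--         if is_valid_item_number(item_number):
--             # This is a valid record
--             if accumulated_description:
--                 # We have accumulated description to merge
--                 merged_description = f"{accumulated_description} {description}".strip()
--                 record_copy = record.copy()
--                 record_copy['Description'] = merged_description
--                 result.append(record_copy)
--
--                 # Look ahead to see if there are more consecutive valid records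
--                 # that should also get the accumulated description
--                 j = i + 1
--                 while j < len(processed_records):
--                     next_record = processed_records[j]
--                     next_item_number = next_record.get('ItemNumber', '')
--                     next_description = clean_description(next_record.get('Description', ''))
--
--                     if is_valid_item_number(next_item_number):
--                         # Another valid record - merge accumulated description
--                         next_merged_description = f"{accumulated_description} {next_description}".strip()
--                         next_record_copy = next_record.copy()
--                         next_record_copy['Description'] = next_merged_description
--                         result.append(next_record_copy)
--                         j += 1
--                     else:
--                         # Found invalid record, break the chain
--                         break
--
--                 # Reset accumulated description and update index
--                 accumulated_description = ""
--                 i = j - 1  # j-1 because the loop will increment i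
--             else:
--                 # No accumulated description, just add the record
--                 result.append(record)
--         else:
--             # Invalid ItemNumber - accumulate description
--             if description:
--                 if accumulated_description:
--                     accumulated_description = f"{accumulated_description} {description}"
--                 else:
--                     accumulated_description = description
--
--         i += 1
--
--     return result
-- ===== SOURCE B (Python) =====
-- def _is_valid_item_number(item_number):
--     """Check if ItemNumber starts with an alphabet (a-z or A-Z)"""
--     if not item_number or item_number == '' or str(item_number).strip() == '':
--         return False
--     return str(item_number)[0].isalpha()
--
--
-- def _clean_description(description):
--     """Clean and normalize description text"""
--     if not description:
--         return ""
--     return str(description).strip()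
--
--
-- def merge_boq_descriptions_advanced(processed_records):
--     """Single flat pass: carry the pending accumulated description and a flag
--     saying whether it has already been applied to a run of valid records."""
--     result = []
--     accumulated = ""
--     applied = False
--     for record in processed_records:
--         description = _clean_description(record.get('Description', ''))
--         if _is_valid_item_number(record.get('ItemNumber', '')):
--             if accumulated:
--                 record_copy = record.copy()
--                 record_copy['Description'] = f"{accumulated} {description}".strip()
--                 result.append(record_copy)
--                 applied = True
--             else:
--                 result.append(record)
--         else:
--             if applied:
--                 accumulated = ""
--                 applied = False
--             if description:
--                 accumulated = f"{accumulated} {description}" if accumulated else description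
--     return result
-- ===== Notes on version B (the rewrite author's own statement) =====
-- stated objective: simpler
-- what changed: Replaces A's nested look-ahead while-loop with j/i=j-1 index manipulation by one flat pass over the records carrying the pending accumulated description plus an 'applied' flag that lazily clears it at the next invalid record.
import Mathlib
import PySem

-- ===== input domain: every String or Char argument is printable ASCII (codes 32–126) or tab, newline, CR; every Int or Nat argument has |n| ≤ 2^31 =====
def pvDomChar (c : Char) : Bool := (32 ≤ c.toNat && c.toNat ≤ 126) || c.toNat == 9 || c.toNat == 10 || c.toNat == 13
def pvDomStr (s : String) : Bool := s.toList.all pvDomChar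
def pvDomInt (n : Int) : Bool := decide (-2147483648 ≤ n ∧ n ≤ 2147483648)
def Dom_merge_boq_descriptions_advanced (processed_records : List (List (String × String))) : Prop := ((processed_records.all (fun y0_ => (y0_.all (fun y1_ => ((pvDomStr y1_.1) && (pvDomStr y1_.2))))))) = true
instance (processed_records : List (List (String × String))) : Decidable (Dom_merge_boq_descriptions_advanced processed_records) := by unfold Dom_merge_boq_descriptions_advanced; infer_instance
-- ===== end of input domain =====

-- B replaces A's nested look-ahead loop and index juggling (j, i = j - 1) by one flat pass
-- carrying the accumulated description and an 'applied' flag; simpler, same O(n) cost.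

-- ===== PORT A =====
-- is_valid_item_number: item_number is a str here, so 'not item_number' is item_number == ''
def pvIsValid (item_number : String) : Bool :=
  if item_number = "" ∨ PySem.Str.strip item_number = "" then false
  else
    match PySem.Str.pyGet? item_number 0 with
    | some c => PySem.Chars.isalpha c
    | none => false

-- clean_description
def pvClean (description : String) : String :=
  if description = "" then "" else PySem.Str.strip description

-- record.get(k, '')
def pvGet (r : List (String × String)) (k : String) : String :=
  (PySem.Dict.mk r).getD k ""

-- record.copy(); record_copy['Description'] = v
def pvSetDesc (r : List (String × String)) (v : String) : List (String × String) :=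
  ((PySem.Dict.mk r).insert "Description" v).items

-- f"{acc} {desc}".strip()
def pvMerge (acc desc : String) : String := PySem.Str.strip (acc ++ " " ++ desc)

-- the 'else' branch: accumulate the description
def pvAccum (acc desc : String) : String :=
  if desc ≠ "" then (if acc ≠ "" then acc ++ " " ++ desc else desc) else acc

-- A's inner look-ahead while loop over j: consumes consecutive valid records,
-- returns (result so far, remaining suffix starting at the chain-breaking record)
def pvAInner (acc : String) (res : List (List (String × String))) :
    List (List (String × String)) → (List (List (String × String)) × List (List (String × String)))
  | [] => (res, [])
  | r :: t =>
    let desc := pvClean (pvGet r "Description")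
    if pvIsValid (pvGet r "ItemNumber") then
      pvAInner acc (res ++ [pvSetDesc r (pvMerge acc desc)]) t
    else (res, r :: t)

theorem pvAInner_snd_length_le (acc : String) :
    ∀ (t : List (List (String × String))) (res : List (List (String × String))),
      (pvAInner acc res t).2.length ≤ t.length := by
  intro t
  induction t with
  | nil => intro res; simp [pvAInner]
  | cons r t ih =>
    intro res
    simp only [pvAInner]
    split
    · exact le_trans (ih _) (Nat.le_succ _)
    · simp

-- A's outer while loop over i (i = j - 1; i += 1 resumes at the record that broke the chain)
def pvALoop (res : List (List (String × String))) (acc : String) :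
    List (List (String × String)) → List (List (String × String))
  | [] => res
  | r :: t =>
    let desc := pvClean (pvGet r "Description")
    if pvIsValid (pvGet r "ItemNumber") then
      if acc ≠ "" then
        let p := pvAInner acc (res ++ [pvSetDesc r (pvMerge acc desc)]) t
        pvALoop p.1 "" p.2
      else pvALoop (res ++ [r]) acc t
    else pvALoop res (pvAccum acc desc) t
termination_by l => l.length
decreasing_by
  · exact Nat.lt_succ_of_le (pvAInner_snd_length_le _ _ _)
  · simp
  · simp

def merge_boq_descriptions_advanced (processed_records : List (List (String × String))) :
    List (List (String × String)) :=
  if processed_records = [] then processed_records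
  else pvALoop [] "" processed_records

-- ===== PORT B =====
-- B: one flat pass with state (result, accumulated, applied)
def pvBLoop (res : List (List (String × String))) (acc : String) (applied : Bool) :
    List (List (String × String)) → List (List (String × String))
  | [] => res
  | r :: t =>
    let desc := pvClean (pvGet r "Description")
    if pvIsValid (pvGet r "ItemNumber") then
      if acc ≠ "" then pvBLoop (res ++ [pvSetDesc r (pvMerge acc desc)]) acc true t
      else pvBLoop (res ++ [r]) acc applied t
    else
      let acc1 := if applied then "" else acc
      pvBLoop res (pvAccum acc1 desc) false t

def merge_boq_descriptions_advanced_alt (processed_records : List (List (String × String))) :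
    List (List (String × String)) :=
  pvBLoop [] "" false processed_records

-- ===== PRECONDITION & SPEC =====
def Spec_merge_boq_descriptions_advanced (processed_records : List (List (String × String))) (out : List (List (String × String))) : Prop := out = merge_boq_descriptions_advanced_alt processed_records
instance (processed_records : List (List (String × String))) (out : List (List (String × String))) : Decidable (Spec_merge_boq_descriptions_advanced processed_records out) := by unfold Spec_merge_boq_descriptions_advanced; infer_instance

-- ===== CLAIM (what is proved, stated in full; the proofs are below) =====
def Claim_equal_merge_boq_descriptions_advanced : Prop := ∀ (processed_records : List (List (String × String))), Dom_merge_boq_descriptions_advanced processed_records → Spec_merge_boq_descriptions_advanced processed_records (merge_boq_descriptions_advanced processed_records)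

-- ===== LEMMAS AND PROOFS =====

-- With a nonempty accumulated description and applied = true, B's flat pass runs exactly
-- A's inner chain loop, then continues with a cleared accumulator.
theorem pvBLoop_true_eq_inner (acc : String) (h : acc ≠ "") :
    ∀ (t res : _), pvBLoop res acc true t
      = pvBLoop (pvAInner acc res t).1 "" false (pvAInner acc res t).2 := by
  intro t
  induction t with
  | nil => intro res; simp [pvBLoop, pvAInner]
  | cons r t ih =>
    intro res
    simp only [pvBLoop, pvAInner]
    split
    · exact ih _
    · simp [pvBLoop, ‹¬ _›]

theorem pvALoop_eq_pvBLoop :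
    ∀ (n : ℕ) (l : List (List (String × String))), l.length ≤ n →
      ∀ acc res, pvALoop res acc l = pvBLoop res acc false l := by
  intro n
  induction n with
  | zero =>
    intro l hl acc res
    have : l = [] := List.eq_nil_of_length_eq_zero (Nat.le_zero.mp hl)
    subst this; simp only [pvALoop, pvBLoop]
  | succ n ih =>
    intro l hl acc res
    cases l with
    | nil => simp only [pvALoop, pvBLoop]
    | cons r t =>
      simp only [pvALoop, pvBLoop]
      split
      · by_cases hacc : acc ≠ ""
        · rw [if_pos hacc, if_pos hacc, pvBLoop_true_eq_inner acc hacc]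
          exact ih _ (le_trans (pvAInner_snd_length_le _ _ _) (Nat.le_of_succ_le_succ hl)) _ _
        · rw [if_neg hacc, if_neg hacc]
          exact ih _ (Nat.le_of_succ_le_succ hl) _ _
      · exact ih _ (Nat.le_of_succ_le_succ hl) _ _

-- ===== VERDICT (by name: the statement is the Claim_ definition above) =====
theorem merge_boq_descriptions_advanced_spec : Claim_equal_merge_boq_descriptions_advanced := by
  intro rs _
  show merge_boq_descriptions_advanced rs = merge_boq_descriptions_advanced_alt rs
  unfold merge_boq_descriptions_advanced merge_boq_descriptions_advanced_alt
  by_cases h : rs = []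
  · subst h; rfl
  · rw [if_neg h]
    exact pvALoop_eq_pvBLoop rs.length rs le_rfl "" []
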